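-- pv_equiv track=rewrite | github.com/srish-bhargava/epilepsy-video-detector-backend | processor.py | postProcessAnomalies
-- ===== SOURCE A (Python) =====
-- def postProcessAnomalies(anomalies, fps):
--     anomalies_bucketed = []
--     sliding_window_size = 10
--     num_points = len(anomalies)
--
--     for i in range(num_points):
--         bucket_val = any(anomalies[max(0, i - sliding_window_size) : i])
--         anomalies_bucketed.append(bucket_val)
--     return anomalies_bucketed
-- ===== SOURCE B (Python) =====
-- def postProcessAnomalies(anomalies, fps):
--     # One pass with a running count of truthy elements in the sliding window,
--     # instead of rescanning the window with any() at every index.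
--     out = []
--     count = 0
--     for i, v in enumerate(anomalies):
--         out.append(count > 0)
--         if v:
--             count += 1
--         j = i - 10
--         if j >= 0 and anomalies[j]:
--             count -= 1
--     return out
-- ===== Notes on version B (the rewrite author's own statement) =====
-- stated objective: faster
-- what changed: Replaced the per-index any() rescan of the trailing 10-element slice by a single pass that maintains a running count of truthy elements in the sliding window (increment on entry, decrement on exit).
import Mathlib
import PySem

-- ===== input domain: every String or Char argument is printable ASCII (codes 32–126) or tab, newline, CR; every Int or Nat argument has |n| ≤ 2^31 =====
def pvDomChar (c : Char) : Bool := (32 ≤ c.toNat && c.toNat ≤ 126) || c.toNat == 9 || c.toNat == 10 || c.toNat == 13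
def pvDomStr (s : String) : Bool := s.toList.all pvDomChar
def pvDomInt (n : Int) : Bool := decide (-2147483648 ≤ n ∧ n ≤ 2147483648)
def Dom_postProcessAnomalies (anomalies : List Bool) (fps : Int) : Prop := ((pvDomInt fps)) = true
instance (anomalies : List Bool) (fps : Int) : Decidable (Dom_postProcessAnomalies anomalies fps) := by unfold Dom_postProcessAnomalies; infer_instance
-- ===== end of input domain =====

-- B replaces A's per-index rescan of the 10-element window (any over a slice) by a single pass
-- maintaining a running count of truthy elements in the window; objective: faster (constant window,
-- so a constant-factor mechanism — the inner slice+any scan disappears).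

-- ===== PORT A =====
def postProcessAnomalies (anomalies : List Bool) (fps : Int) : List Bool :=
  (PySem.List.pyRange 0 (anomalies.length : Int) 1).foldl
    (fun anomalies_bucketed i =>
      anomalies_bucketed ++
        [(PySem.List.slice anomalies (some (max 0 (i - 10))) (some i)).any (fun b => b)])
    []

-- ===== PORT B =====
def postProcessAnomalies_alt (anomalies : List Bool) (fps : Int) : List Bool :=
  ((PySem.List.enumerate anomalies 0).foldl
    (fun s iv =>
      let out := s.1 ++ [decide ((0 : Int) < s.2)]
      let count := if iv.2 then s.2 + 1 else s.2
      let j := iv.1 - 10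
      let count := if 0 ≤ j ∧ PySem.List.pyGetD anomalies j false = true then count - 1 else count
      (out, count))
    ([], (0 : Int))).1

-- ===== PRECONDITION & SPEC =====
def Spec_postProcessAnomalies (anomalies : List Bool) (fps : Int) (out : List Bool) : Prop := out = postProcessAnomalies_alt anomalies fps
instance (anomalies : List Bool) (fps : Int) (out : List Bool) : Decidable (Spec_postProcessAnomalies anomalies fps out) := by unfold Spec_postProcessAnomalies; infer_instance

-- ===== CLAIM (what is proved, stated in full; the proofs are below) =====
def Claim_equal_postProcessAnomalies : Prop := ∀ (anomalies : List Bool) (fps : Int), Dom_postProcessAnomalies anomalies fps → Spec_postProcessAnomalies anomalies fps (postProcessAnomalies anomalies fps)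

-- ===== LEMMAS AND PROOFS =====

-- prefix count: number of truthy elements among the first k
def pvPc (a : List Bool) (k : ℕ) : ℕ := (a.take k).countP (fun b => b)

theorem pvPc_split (a : List Bool) {j k : ℕ} (h : j ≤ k) :
    pvPc a k = pvPc a j + ((a.take k).drop j).countP (fun b => b) := by
  unfold pvPc
  conv_lhs => rw [← List.take_append_drop j (a.take k)]
  rw [List.countP_append, List.take_take, Nat.min_eq_left h]

theorem pvPc_succ (a : List Bool) {k : ℕ} (h : k < a.length) :
    pvPc a (k + 1) = pvPc a k + (if a.getD k false then 1 else 0) := by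
  unfold pvPc
  rw [List.take_add_one, List.countP_append, List.getElem?_eq_getElem h]
  simp [List.getD, List.getElem?_eq_getElem h]

theorem pvAny_eq_countP (l : List Bool) :
    (l.any fun b => b) = decide (0 < l.countP (fun b => b)) := by
  induction l with
  | nil => rfl
  | cons x t ih => cases x <;> simp [ih]

-- A's slice at index k is the window a[k-10 .. k)
theorem pvSlice_window (a : List Bool) (k : ℕ) :
    PySem.List.slice a (some (max 0 ((k : Int) - 10))) (some (k : Int))
      = (a.take k).drop (k - 10) := by
  by_cases hk : 10 ≤ k
  · have h1 : max 0 ((k : Int) - 10) = ((k - 10 : ℕ) : Int) := by omega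
    rw [h1, PySem.List.slice_natCast, List.drop_take]
  · have h1 : max 0 ((k : Int) - 10) = ((0 : ℕ) : Int) := by omega
    have h2 : k - 10 = 0 := by omega
    rw [h1, PySem.List.slice_natCast, h2]
    simp

-- the common specification of both programs at index k
def pvF (a : List Bool) (k : ℕ) : Bool :=
  decide ((0 : Int) < (pvPc a k : Int) - (pvPc a (k - 10) : Int))

theorem pvA_eq_map (a : List Bool) (fps : Int) :
    postProcessAnomalies a fps = (List.range a.length).map (pvF a) := by
  unfold postProcessAnomalies
  rw [PySem.List.foldl_append_singleton_eq_map, PySem.List.pyRange_one]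
  simp only [Int.sub_zero, Int.toNat_natCast, List.map_map, List.nil_append]
  apply List.map_congr_left
  intro k _
  simp only [Function.comp_apply, Int.zero_add]
  rw [pvSlice_window, pvAny_eq_countP, pvF]
  have hsplit := pvPc_split a (Nat.sub_le k 10)
  have : ((a.take k).drop (k - 10)).countP (fun b => b) = pvPc a k - pvPc a (k - 10) := by omega
  rw [this]
  have hle : pvPc a (k - 10) ≤ pvPc a k := by omega
  simp only [decide_eq_decide]
  omega

def pvStep (a : List Bool) : List Bool × Int → Int × Bool → List Bool × Int :=
  fun s iv =>
    let out := s.1 ++ [decide ((0 : Int) < s.2)]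
    let count := if iv.2 then s.2 + 1 else s.2
    let j := iv.1 - 10
    let count := if 0 ≤ j ∧ PySem.List.pyGetD a j false = true then count - 1 else count
    (out, count)

theorem pvEnum_cons (x : Bool) (t : List Bool) (s : Int) :
    PySem.List.enumerate (x :: t) s = (s, x) :: PySem.List.enumerate t (s + 1) := by
  simp [PySem.List.enumerate]

theorem pvAlt_go (a : List Bool) :
    ∀ (n k : ℕ), a.length - k = n → k ≤ a.length → ∀ (acc : List Bool),
    ((PySem.List.enumerate (a.drop k) (k : Int)).foldl (pvStep a)
      (acc, (pvPc a k : Int) - (pvPc a (k - 10) : Int))).1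
    = acc ++ (List.range' k n).map (pvF a) := by
  intro n
  induction n with
  | zero =>
    intro k hn hk acc
    have : a.length ≤ k := by omega
    rw [List.drop_eq_nil_of_le this]
    simp [PySem.List.enumerate]
  | succ n ih =>
    intro k hn hk acc
    have hklt : k < a.length := by omega
    rw [← List.getElem_cons_drop hklt, pvEnum_cons, List.foldl_cons]
    have hstep :
        pvStep a (acc, (pvPc a k : Int) - (pvPc a (k - 10) : Int)) ((k : Int), a[k])
        = (acc ++ [pvF a k], (pvPc a (k + 1) : Int) - (pvPc a (k + 1 - 10) : Int)) := by
      simp only [pvStep, pvF]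
      refine Prod.ext rfl ?_
      simp only
      have hpk : pvPc a (k + 1) = pvPc a k + (if a.getD k false then 1 else 0) :=
        pvPc_succ a hklt
      have hget : a.getD k false = a[k] := by
        simp [List.getD, List.getElem?_eq_getElem hklt]
      by_cases h10 : 10 ≤ k
      · have hj : (0 : Int) ≤ (k : Int) - 10 := by omega
        have hjcast : (k : Int) - 10 = ((k - 10 : ℕ) : Int) := by omega
        have hjlt : k - 10 < a.length := by omega
        have hgetj : PySem.List.pyGetD a ((k : Int) - 10) false = a[k - 10] := by
          rw [hjcast, PySem.List.pyGetD_natCast]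
          simp [List.getD, List.getElem?_eq_getElem hjlt]
        have hpj : pvPc a (k - 10 + 1) = pvPc a (k - 10) + (if a.getD (k - 10) false then 1 else 0) :=
          pvPc_succ a hjlt
        have hgetj' : a.getD (k - 10) false = a[k - 10] := by
          simp [List.getD, List.getElem?_eq_getElem hjlt]
        have hidx : k + 1 - 10 = k - 10 + 1 := by omega
        rw [hidx, hgetj, hpk, hpj, hget, hgetj']
        cases hak : a[k] <;> cases hakj : a[k - 10] <;>
          simp <;> omega
      · have hj : ¬ (0 : Int) ≤ (k : Int) - 10 := by omega
        have hidx : k + 1 - 10 = 0 := by omega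
        have hidx' : k - 10 = 0 := by omega
        rw [hpk, hget, hidx, hidx']
        cases hak : a[k] <;> simp <;> omega
    rw [hstep]
    have := ih (k + 1) (by omega) (by omega) (acc ++ [pvF a k])
    have hcast : ((k : Int) + 1) = ((k + 1 : ℕ) : Int) := by push_cast; ring
    rw [hcast]
    rw [this, List.range'_succ]
    simp

theorem pvB_eq_map (a : List Bool) (fps : Int) :
    postProcessAnomalies_alt a fps = (List.range a.length).map (pvF a) := by
  unfold postProcessAnomalies_alt
  have hl : (fun (s : List Bool × Int) (iv : Int × Bool) =>
      let out := s.1 ++ [decide ((0 : Int) < s.2)]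
      let count := if iv.2 then s.2 + 1 else s.2
      let j := iv.1 - 10
      let count := if 0 ≤ j ∧ PySem.List.pyGetD a j false = true then count - 1 else count
      (out, count)) = pvStep a := rfl
  rw [hl]
  have h0 : ((0 : Int)) = (pvPc a 0 : Int) - (pvPc a (0 - 10) : Int) := by
    simp [pvPc]
  rw [show (PySem.List.enumerate a 0) = PySem.List.enumerate (a.drop 0) ((0 : ℕ) : Int) by simp]
  rw [show (([] : List Bool), (0 : Int)) = (([] : List Bool), (pvPc a 0 : Int) - (pvPc a (0 - 10) : Int)) by rw [← h0]]
  rw [pvAlt_go a a.length 0 (by omega) (by omega) []]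
  simp [List.range_eq_range']

-- ===== VERDICT (by name: the statement is the Claim_ definition above) =====
theorem postProcessAnomalies_spec : Claim_equal_postProcessAnomalies := by
  intro anomalies fps _
  unfold Spec_postProcessAnomalies
  rw [pvA_eq_map, pvB_eq_map]
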